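-- pv_equiv track=rewrite | github.com/akshaynuvepro/genai_profiler | backend/app/services/analyzer.py | _generate_confidence_notes
-- ===== SOURCE A (Python) =====
-- def _generate_confidence_notes(techniques: list) -> list:
--     """Generate notes about confidence levels"""
--     notes = []
--
--     high_conf = sum(1 for t in techniques if t["confidence"] == "High")
--     medium_conf = sum(1 for t in techniques if t["confidence"] == "Medium")
--     low_conf = sum(1 for t in techniques if t["confidence"] == "Low")
--
--     if high_conf > 0:
--         notes.append(f"{high_conf} technique(s) detected with high confidence")
--     if medium_conf > 0:
--         notes.append(f"{medium_conf} technique(s) detected with medium confidence - recommend manual verification")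
--     if low_conf > 0:
--         notes.append(f"{low_conf} technique(s) detected with low confidence - may be false positives")
--
--     return notes
-- ===== SOURCE B (Python) =====
-- def _generate_confidence_notes(techniques: list) -> list:
--     """Generate notes about confidence levels"""
--     rank = {"High": 0, "Medium": 1, "Low": 2}
--     suffix = {
--         "High": " technique(s) detected with high confidence",
--         "Medium": " technique(s) detected with medium confidence - recommend manual verification",
--         "Low": " technique(s) detected with low confidence - may be false positives",
--     }
--     relevant = sorted((t["confidence"] for t in techniques if t["confidence"] in rank),
--                       key=lambda c: rank[c])
--     notes = []
--     run_val = None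
--     run_len = 0
--     for c in relevant:
--         if c == run_val:
--             run_len += 1
--         else:
--             if run_len > 0:
--                 notes.append(f"{run_len}{suffix[run_val]}")
--             run_val = c
--             run_len = 1
--     if run_len > 0:
--         notes.append(f"{run_len}{suffix[run_val]}")
--     return notes
-- ===== Notes on version B (the rewrite author's own statement) =====
-- stated objective: alternative
-- what changed: Replaces A's three separate counting scans with a sort-then-group algorithm: B extracts the confidence values, sorts the recognized ones by severity rank, then emits one note per run of equal values in a single grouping pass (run length = count), so no per-level counters exist.
-- outside the precondition, e.g. on _generate_confidence_notes([{}]): A raises KeyError, B raises KeyError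
import Mathlib
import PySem

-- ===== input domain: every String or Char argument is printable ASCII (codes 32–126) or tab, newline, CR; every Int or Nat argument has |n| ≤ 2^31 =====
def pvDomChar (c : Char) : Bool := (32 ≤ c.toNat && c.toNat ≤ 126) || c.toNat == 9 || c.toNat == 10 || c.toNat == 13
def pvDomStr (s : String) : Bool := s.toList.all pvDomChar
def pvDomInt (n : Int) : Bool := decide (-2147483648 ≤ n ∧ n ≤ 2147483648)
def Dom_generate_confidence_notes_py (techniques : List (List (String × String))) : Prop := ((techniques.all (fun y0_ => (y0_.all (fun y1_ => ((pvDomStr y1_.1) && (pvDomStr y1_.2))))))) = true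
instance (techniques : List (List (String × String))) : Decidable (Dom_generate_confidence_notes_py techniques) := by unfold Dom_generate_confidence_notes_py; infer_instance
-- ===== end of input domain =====

-- B sorts the confidence values by severity rank and emits one note per run of equal values (sort-then-group-runs), instead of A's three counting scans; same return value.


-- t["confidence"]: first-match lookup; Pre_ guarantees the key is present, so the "" default is never used
def pvConf (t : List (String × String)) : String :=
  ((PySem.Dict.mk t).get? "confidence").getD ""

-- ===== PORT A =====
def generate_confidence_notes_py (techniques : List (List (String × String))) : List String :=
  let notes : List String := []
  let high_conf : Int := techniques.foldl (fun acc t => if pvConf t == "High" then acc + 1 else acc) 0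
  let medium_conf : Int := techniques.foldl (fun acc t => if pvConf t == "Medium" then acc + 1 else acc) 0
  let low_conf : Int := techniques.foldl (fun acc t => if pvConf t == "Low" then acc + 1 else acc) 0
  let notes := if high_conf > 0 then notes ++ [PySem.Int.toStr high_conf ++ " technique(s) detected with high confidence"] else notes
  let notes := if medium_conf > 0 then notes ++ [PySem.Int.toStr medium_conf ++ " technique(s) detected with medium confidence - recommend manual verification"] else notes
  let notes := if low_conf > 0 then notes ++ [PySem.Int.toStr low_conf ++ " technique(s) detected with low confidence - may be false positives"] else notes
  notes

-- ===== PORT B =====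
def pvRankDict : PySem.Dict String Int :=
  PySem.Dict.mk [("High", 0), ("Medium", 1), ("Low", 2)]
def pvSuffixDict : PySem.Dict String String :=
  PySem.Dict.mk [("High", " technique(s) detected with high confidence"),
                 ("Medium", " technique(s) detected with medium confidence - recommend manual verification"),
                 ("Low", " technique(s) detected with low confidence - may be false positives")]
-- rank[c]: only evaluated on keys of the dict (the sort key after the filter), so the 0 default is never used
def pvRank (c : String) : Int := (pvRankDict.get? c).getD 0
-- suffix[run_val]: only evaluated with run_len > 0, hence run_val a key of suffix; the "" default is never used
def pvSuffix (rv : Option String) : String := (pvSuffixDict.get? (rv.getD "")).getD ""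

-- one iteration of B's run-grouping loop over (notes, run_val, run_len)
def pvStep (st : List String × Option String × Int) (c : String) : List String × Option String × Int :=
  match st with
  | (notes, run_val, run_len) =>
    if some c == run_val then (notes, run_val, run_len + 1)
    else ((if run_len > 0 then notes ++ [PySem.Int.toStr run_len ++ pvSuffix run_val] else notes), some c, 1)

def generate_confidence_notes_py_alt (techniques : List (List (String × String))) : List String :=
  let relevant :=
    PySem.List.sorted ((techniques.map pvConf).filter (fun c => pvRankDict.contains c)) pvRank false
  let st := relevant.foldl pvStep ([], none, 0)
  if st.2.2 > 0 then st.1 ++ [PySem.Int.toStr st.2.2 ++ pvSuffix st.2.1] else st.1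

-- ===== PRECONDITION & SPEC =====
-- Pre_ excludes techniques entries lacking the "confidence" key, on which both Pythons raise KeyError.
def Pre_generate_confidence_notes_py (techniques : List (List (String × String))) : Prop :=
  (techniques.all (fun t => (PySem.Dict.mk t).contains "confidence")) = true
instance (techniques : List (List (String × String))) : Decidable (Pre_generate_confidence_notes_py techniques) := by unfold Pre_generate_confidence_notes_py; infer_instance
def pvWitness_generate_confidence_notes_py : (List (List (String × String))) :=
  [[("confidence", "High")], [("confidence", "Low"), ("name", "x")]]
def Spec_generate_confidence_notes_py (techniques : List (List (String × String))) (out : List String) : Prop := out = generate_confidence_notes_py_alt techniques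
instance (techniques : List (List (String × String))) (out : List String) : Decidable (Spec_generate_confidence_notes_py techniques out) := by unfold Spec_generate_confidence_notes_py; infer_instance

-- ===== CLAIM (what is proved, stated in full; the proofs are below) =====
def Claim_equal_generate_confidence_notes_py : Prop := ∀ (techniques : List (List (String × String))), Dom_generate_confidence_notes_py techniques → Pre_generate_confidence_notes_py techniques → Spec_generate_confidence_notes_py techniques (generate_confidence_notes_py techniques)

-- ===== LEMMAS AND PROOFS =====

-- A's counting loop computes the count of v among the mapped confidence values
lemma acount_eq_count (techniques : List (List (String × String))) (v : String) :
    techniques.foldl (fun acc t => if pvConf t == v then acc + 1 else acc) (0 : Int)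
      = ((techniques.map pvConf).count v : Int) := by
  rw [PySem.List.foldl_count_if (fun t => pvConf t == v)]
  simp only [List.count, List.countP_map, zero_add]
  rfl

-- continuing a run: each equal element just bumps run_len
lemma run_same (v : String) (n : Nat) : ∀ (notes : List String) (k : Int),
    (List.replicate n v).foldl pvStep (notes, some v, k) = (notes, some v, k + n) := by
  induction n with
  | zero => intro notes k; simp
  | succ a ih =>
    intro notes k
    rw [List.replicate_succ, List.foldl_cons]
    rw [show pvStep (notes, some v, k) v = (notes, some v, k + 1) by simp [pvStep]]
    rw [ih]
    congr 1; congr 1; push_cast; ring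

-- a block of n equal values entered from a different run_val: flush, then count the block
lemma run_block (n : Nat) (v : String) (notes : List String) (rv : Option String) (k : Int)
    (hne : (some v == rv) = false) :
    (List.replicate n v).foldl pvStep (notes, rv, k)
      = if n = 0 then (notes, rv, k)
        else ((if k > 0 then notes ++ [PySem.Int.toStr k ++ pvSuffix rv] else notes), some v, (n : Int)) := by
  cases n with
  | zero => simp
  | succ a =>
    rw [List.replicate_succ, List.foldl_cons]
    simp only [pvStep, hne, if_neg, Bool.false_eq_true, not_false_iff]
    rw [run_same]
    simp only [Nat.succ_ne_zero, if_false]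
    congr 2; push_cast; ring

-- evaluating B's run-grouping loop on the canonical sorted form
lemma runscan (h m l : Nat) :
    (fun st : List String × Option String × Int =>
        if st.2.2 > 0 then st.1 ++ [PySem.Int.toStr st.2.2 ++ pvSuffix st.2.1] else st.1)
      ((List.replicate h "High" ++ List.replicate m "Medium" ++ List.replicate l "Low").foldl pvStep ([], none, 0))
    = ((((if (h : Int) > 0 then [PySem.Int.toStr (h : Int) ++ " technique(s) detected with high confidence"] else ([] : List String))
        ++ (if (m : Int) > 0 then [PySem.Int.toStr (m : Int) ++ " technique(s) detected with medium confidence - recommend manual verification"] else []))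
        ++ (if (l : Int) > 0 then [PySem.Int.toStr (l : Int) ++ " technique(s) detected with low confidence - may be false positives"] else []))) := by
  rcases h with _ | a <;> rcases m with _ | b <;> rcases l with _ | c <;>
    simp [List.foldl_append, run_block, pvSuffix, pvSuffixDict, PySem.Dict.get?]

-- the filtered confidence values are among the three ranked levels
lemma mem_three {x : String} (hx : pvRankDict.contains x = true) :
    x = "High" ∨ x = "Medium" ∨ x = "Low" := by
  simp [pvRankDict, PySem.Dict.contains] at hx
  rcases hx with h | h | h <;> simp_all

-- a rank-sorted list over the three levels is High-block ++ Medium-block ++ Low-block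
lemma canon (L : List String)
    (hmem : ∀ x ∈ L, x = "High" ∨ x = "Medium" ∨ x = "Low")
    (hsort : L.Pairwise (fun a b => pvRank a ≤ pvRank b)) :
    L = List.replicate (L.count "High") "High" ++ List.replicate (L.count "Medium") "Medium"
        ++ List.replicate (L.count "Low") "Low" := by
  induction L with
  | nil => simp
  | cons x t ih =>
    have hmem' : ∀ y ∈ t, y = "High" ∨ y = "Medium" ∨ y = "Low" := fun y hy => hmem y (by simp [hy])
    have hpair := List.pairwise_cons.mp hsort
    have ht := ih hmem' hpair.2
    rcases hmem x (by simp) with h | h | h <;> subst h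
    · rw [List.count_cons_self, List.count_cons_of_ne (by decide), List.count_cons_of_ne (by decide),
        List.replicate_succ, List.cons_append, List.cons_append]
      congr 1
    · have hH : t.count "High" = 0 := by
        rw [List.count_eq_zero]
        intro hmemH
        have := hpair.1 "High" hmemH
        simp [pvRank, pvRankDict, PySem.Dict.get?] at this
      rw [List.count_cons_of_ne (by decide), List.count_cons_self, List.count_cons_of_ne (by decide), hH]
      rw [hH] at ht
      simpa [List.replicate_succ] using ht
    · have hH : t.count "High" = 0 := by
        rw [List.count_eq_zero]
        intro hmemH
        have := hpair.1 "High" hmemH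
        simp [pvRank, pvRankDict, PySem.Dict.get?] at this
      have hM : t.count "Medium" = 0 := by
        rw [List.count_eq_zero]
        intro hmemM
        have := hpair.1 "Medium" hmemM
        simp [pvRank, pvRankDict, PySem.Dict.get?] at this
      rw [List.count_cons_of_ne (by decide), List.count_cons_of_ne (by decide), List.count_cons_self,
        hH, hM]
      rw [hH, hM] at ht
      simpa [List.replicate_succ] using ht

-- B's sorted "relevant" list in canonical form, with the counts of the unfiltered values
lemma sorted_canon (cs : List String) :
    PySem.List.sorted (cs.filter (fun c => pvRankDict.contains c)) pvRank false
      = List.replicate (cs.count "High") "High" ++ List.replicate (cs.count "Medium") "Medium"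
        ++ List.replicate (cs.count "Low") "Low" := by
  set f := cs.filter (fun c => pvRankDict.contains c) with hf
  have hperm := PySem.List.sorted_perm f pvRank false
  have hmem : ∀ x ∈ PySem.List.sorted f pvRank false, x = "High" ∨ x = "Medium" ∨ x = "Low" := by
    intro x hx
    have : x ∈ f := hperm.mem_iff.mp hx
    exact mem_three (List.of_mem_filter this)
  have hc := canon _ hmem (PySem.List.sorted_pairwise f pvRank)
  have hcnt : ∀ v, pvRankDict.contains v = true →
      (PySem.List.sorted f pvRank false).count v = cs.count v := by
    intro v hv
    rw [hperm.count_eq, hf, List.count_filter hv]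
  rw [hc, hcnt "High" (by decide), hcnt "Medium" (by decide), hcnt "Low" (by decide)]

-- moving the trailing append into the if: A's conditional-append layers become appended optional singletons
lemma append_ite (c : Prop) [Decidable c] (xs ys : List String) :
    (if c then xs ++ ys else xs) = xs ++ (if c then ys else []) := by
  split <;> simp

-- ===== VERDICT (by name: the statement is the Claim_ definition above) =====
theorem generate_confidence_notes_py_spec : Claim_equal_generate_confidence_notes_py := by
  intro techniques _ _
  unfold Spec_generate_confidence_notes_py
  unfold generate_confidence_notes_py generate_confidence_notes_py_alt
  simp only [acount_eq_count, sorted_canon, List.nil_append]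
  rw [append_ite, append_ite]
  exact (runscan ((techniques.map pvConf).count "High") ((techniques.map pvConf).count "Medium")
    ((techniques.map pvConf).count "Low")).symm
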